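-- pv_equiv track=rewrite | github.com/wangru25/SARS-CoV-2-Projects | MSA_SNP/genomeMSA_2021/snpRecords/mergeFiles.py | checkDate
-- ===== SOURCE A (Python) =====
-- month2021 = ['1', '01', '2', '02', '3', '03', '4', '04', '5', '05', '6', '06']
--
-- def checkDate(seqId, month2021 = month2021):
--     '''
--         Checks date to make sure the date is valid
--         month2021: shows the month we are
--         output: True/False, seqId
--             True if the date is good
--             False if the date is bad
--             seqId: empty if bad, adjusted if good
--
--     '''
--     thirty = ['1', '01', '2', '02', '3', '03', '4', '04', '5', '05', '6', '06', '7', '07', '8', '08', '9', '09',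
--           '10', '11', '12', '13', '14', '15', '16', '17', '18', '19',
--           '20', '21', '22', '23', '24', '25', '26', '27', '28', '29', '30']
--     thirtyone = ['1', '01', '2', '02', '3', '03', '4', '04', '5', '05', '6', '06', '7', '07', '8', '08', '9', '09',
--                  '10', '11', '12', '13', '14', '15', '16', '17', '18', '19',
--                  '20', '21', '22', '23', '24', '25', '26', '27', '28', '29', '30', '31']
--     twenty = ['1', '01', '2', '02', '3', '03', '4', '04', '5', '05', '6', '06', '7', '07', '8', '08', '9', '09',
--               '10', '11', '12', '13', '14', '15', '16', '17', '18', '19',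
--               '20', '21', '22', '23', '24', '25', '26', '27', '28', '29']
--     thirtyone_month = ['1','3', '5', '7', '01', '03', '05', '07', '8', '08', '10', '12']
--     thirty_month = ['4', '6', '04', '06', '9', '09', '11']
--     single = ['1', '2', '3', '4' ,'5', '6', '7', '8', '9']
--
--     valid_year = ['2020', '2021']
--
--     #extract the date
--     splitName = seqId.split('|')
--     fulldate = splitName[-1]
--     try:
--         year, month, date = fulldate.split('-')
--     except:
--         return False, seqId
--
--     #check year
--     if year not in valid_year:
--         return False, seqId
--
--     #check for month-date combo
--     if month in thirty_month:
--         if date not in thirty: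
--             return False, seqId
--     elif month in thirtyone_month:
--         if date not in thirtyone:
--             return False, seqId
--     elif month in ['2', '02']:
--         if date not in twenty:
--             return False, seqId
--     else:
--         return False, seqId
--
--     #if the year is 2021, make sure that the data is not in the future
--     if year == "2021":
--         if month not in month2021:
--             return False, seqId
--
--     #fix the date
--     fulldate_fixed = year
--     if month in single:
--         fulldate_fixed += '-0' + month
--     else:
--         fulldate_fixed += '-' + month
--
--     if date in single:
--         fulldate_fixed += '-0' + date
--     else:
--         fulldate_fixed += '-' + date
--
--     seqIdFixed = ''
--     for i in range(len(splitName) - 1):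
--         seqIdFixed += splitName[i]
--         seqIdFixed += '|'
--     seqIdFixed += fulldate_fixed
--
--     return True, seqIdFixed
-- ===== SOURCE B (Python) =====
-- month2021 = ['1', '01', '2', '02', '3', '03', '4', '04', '5', '05', '6', '06']
--
-- # Precomputed table of every valid canonical date string: validation becomes a
-- # single membership test of the zero-padded date against this table.
-- _MONTH_DAYS = [(1, 31), (2, 29), (3, 31), (4, 30), (5, 31), (6, 30),
--                (7, 31), (8, 31), (9, 30), (10, 31), (11, 30), (12, 31)]
--
-- _VALID_DATES = ['%s-%02d-%02d' % (y, m, d)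
--                 for y in ('2020', '2021')
--                 for m, maxd in _MONTH_DAYS
--                 for d in range(1, maxd + 1)]
--
-- def checkDate(seqId, month2021=month2021):
--     splitName = seqId.split('|')
--     parts = splitName[-1].split('-')
--     if len(parts) != 3:
--         return False, seqId
--     year, month, date = parts
--     fixed = '%s-%s-%s' % (year,
--                           '0' + month if len(month) == 1 else month,
--                           '0' + date if len(date) == 1 else date)
--     if fixed not in _VALID_DATES:
--         return False, seqId
--     if year == '2021' and month not in month2021:
--         return False, seqId
--     return True, '|'.join(splitName[:-1] + [fixed])
-- ===== Notes on version B (the rewrite author's own statement) =====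
-- stated objective: alternative
-- what changed: Replaces A's per-field branch-and-validate chain (six enumerated month/day lists with a month-class case split, then '-0' fixups and an index-loop rebuild) by a precomputed lookup table of all 732 valid canonical date strings: B zero-pads the fields first, validates with a single membership test of the whole normalized date against that table, and rebuilds with '|'.join.
import Mathlib
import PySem

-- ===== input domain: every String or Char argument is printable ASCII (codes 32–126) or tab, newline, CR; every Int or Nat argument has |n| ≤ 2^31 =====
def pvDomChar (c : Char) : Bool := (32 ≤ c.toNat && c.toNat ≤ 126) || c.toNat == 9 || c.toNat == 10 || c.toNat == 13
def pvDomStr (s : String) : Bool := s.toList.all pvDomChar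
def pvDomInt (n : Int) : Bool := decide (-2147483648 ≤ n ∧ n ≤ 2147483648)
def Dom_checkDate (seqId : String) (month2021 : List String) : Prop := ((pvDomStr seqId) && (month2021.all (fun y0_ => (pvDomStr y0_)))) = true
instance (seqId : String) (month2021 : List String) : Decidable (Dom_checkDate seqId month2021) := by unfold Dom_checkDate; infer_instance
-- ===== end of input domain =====

-- B validates by normalizing (zero-padding) the date fields first and testing the whole
-- canonical date string against a precomputed table of all valid dates; objective: alternative.


-- ===== PORT A =====
-- the literal string-lists of A ('thirty', 'thirtyone', 'twenty', 'thirtyone_month',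
-- 'thirty_month', 'single', 'valid_year'), written as their character lists
def pvThirty : List (List Char) := [['1'], ['0', '1'], ['2'], ['0', '2'], ['3'], ['0', '3'], ['4'], ['0', '4'], ['5'], ['0', '5'], ['6'], ['0', '6'], ['7'], ['0', '7'], ['8'], ['0', '8'], ['9'], ['0', '9'], ['1', '0'], ['1', '1'], ['1', '2'], ['1', '3'], ['1', '4'], ['1', '5'], ['1', '6'], ['1', '7'], ['1', '8'], ['1', '9'], ['2', '0'], ['2', '1'], ['2', '2'], ['2', '3'], ['2', '4'], ['2', '5'], ['2', '6'], ['2', '7'], ['2', '8'], ['2', '9'], ['3', '0']]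
def pvThirtyone : List (List Char) := [['1'], ['0', '1'], ['2'], ['0', '2'], ['3'], ['0', '3'], ['4'], ['0', '4'], ['5'], ['0', '5'], ['6'], ['0', '6'], ['7'], ['0', '7'], ['8'], ['0', '8'], ['9'], ['0', '9'], ['1', '0'], ['1', '1'], ['1', '2'], ['1', '3'], ['1', '4'], ['1', '5'], ['1', '6'], ['1', '7'], ['1', '8'], ['1', '9'], ['2', '0'], ['2', '1'], ['2', '2'], ['2', '3'], ['2', '4'], ['2', '5'], ['2', '6'], ['2', '7'], ['2', '8'], ['2', '9'], ['3', '0'], ['3', '1']]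
def pvTwenty : List (List Char) := [['1'], ['0', '1'], ['2'], ['0', '2'], ['3'], ['0', '3'], ['4'], ['0', '4'], ['5'], ['0', '5'], ['6'], ['0', '6'], ['7'], ['0', '7'], ['8'], ['0', '8'], ['9'], ['0', '9'], ['1', '0'], ['1', '1'], ['1', '2'], ['1', '3'], ['1', '4'], ['1', '5'], ['1', '6'], ['1', '7'], ['1', '8'], ['1', '9'], ['2', '0'], ['2', '1'], ['2', '2'], ['2', '3'], ['2', '4'], ['2', '5'], ['2', '6'], ['2', '7'], ['2', '8'], ['2', '9']]
def pvThirtyoneMonth : List (List Char) := [['1'], ['3'], ['5'], ['7'], ['0', '1'], ['0', '3'], ['0', '5'], ['0', '7'], ['8'], ['0', '8'], ['1', '0'], ['1', '2']]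
def pvThirtyMonth : List (List Char) := [['4'], ['6'], ['0', '4'], ['0', '6'], ['9'], ['0', '9'], ['1', '1']]
def pvSingle : List (List Char) := [['1'], ['2'], ['3'], ['4'], ['5'], ['6'], ['7'], ['8'], ['9']]
def pvValidYear : List (List Char) := [['2', '0', '2', '0'], ['2', '0', '2', '1']]

-- A's code after the month/date membership checks succeeded (the '#if the year is 2021 …'
-- early return, the date reformatting, and the seqId rebuild loop)
def checkDateRest (seqId : String) (month2021 : List String)
    (splitName : List (List Char)) (year month date : List Char) : Bool × String :=
  if year = ['2', '0', '2', '1'] ∧ month ∉ month2021.map String.toList then (false, seqId)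
  else
    let f1 : List Char := year ++ (if month ∈ pvSingle then ['-', '0'] ++ month else ['-'] ++ month)
    let f2 : List Char := f1 ++ (if date ∈ pvSingle then ['-', '0'] ++ date else ['-'] ++ date)
    let seqIdFixed : List Char :=
      (PySem.List.pyRange 0 (PySem.List.len splitName - 1) 1).foldl
        (fun acc i => acc ++ PySem.List.pyGetD splitName i [] ++ ['|']) []
    (true, String.ofList (seqIdFixed ++ f2))

-- A's checks (year, then the month/date membership chain), given the unpacked date
def checkDateBody (seqId : String) (month2021 : List String)
    (splitName : List (List Char)) (year month date : List Char) : Bool × String :=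
  if year ∉ pvValidYear then (false, seqId)
  else if month ∈ pvThirtyMonth then
    (if date ∉ pvThirty then (false, seqId)
     else checkDateRest seqId month2021 splitName year month date)
  else if month ∈ pvThirtyoneMonth then
    (if date ∉ pvThirtyone then (false, seqId)
     else checkDateRest seqId month2021 splitName year month date)
  else if month ∈ [['2'], ['0', '2']] then
    (if date ∉ pvTwenty then (false, seqId)
     else checkDateRest seqId month2021 splitName year month date)
  else (false, seqId)

def checkDate (seqId : String) (month2021 : List String) : Bool × String :=
  let splitName := PySem.Chars.splitOn seqId.toList ['|']
  let fulldate := (PySem.List.pyGet? splitName (-1)).getD []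
  match PySem.Chars.splitOn fulldate ['-'] with    -- try: year, month, date = fulldate.split('-')
  | [year, month, date] => checkDateBody seqId month2021 splitName year month date
  | _ => (false, seqId)                            -- except: return False, seqId

-- ===== PORT B =====
-- f'{n:02d}' ('%02d' % n) for 0 ≤ n
def pvPad2 (n : Int) : List Char := PySem.Chars.zfill (PySem.Int.toChars n) 2
-- '0' + s if len(s) == 1 else s
def pvPad (s : List Char) : List Char := if s.length = 1 then '0' :: s else s
-- _MONTH_DAYS
def pvMonthDays : List (Int × Int) := [(1, 31), (2, 29), (3, 31), (4, 30), (5, 31), (6, 30), (7, 31), (8, 31), (9, 30), (10, 31), (11, 30), (12, 31)]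
-- _VALID_DATES: the comprehension over years, months and day ranges
def pvValidDates : List (List Char) :=
  ([['2', '0', '2', '0'], ['2', '0', '2', '1']] : List (List Char)).flatMap (fun y =>
    pvMonthDays.flatMap (fun md =>
      (PySem.List.pyRange 1 (md.2 + 1) 1).map (fun d =>
        y ++ ['-'] ++ pvPad2 md.1 ++ ['-'] ++ pvPad2 d)))

def checkDate_alt (seqId : String) (month2021 : List String) : Bool × String :=
  let splitName := PySem.Chars.splitOn seqId.toList ['|']
  let parts := PySem.Chars.splitOn ((PySem.List.pyGet? splitName (-1)).getD []) ['-']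
  if parts.length ≠ 3 then (false, seqId)       -- if len(parts) != 3: return False, seqId
  else
    let year := parts.getD 0 []                  -- year, month, date = parts
    let month := parts.getD 1 []
    let date := parts.getD 2 []
    let fixed : List Char := year ++ ['-'] ++ pvPad month ++ ['-'] ++ pvPad date
    if fixed ∉ pvValidDates then (false, seqId)
    else if year = ['2', '0', '2', '1'] ∧ month ∉ month2021.map String.toList then (false, seqId)
    else (true, String.ofList (PySem.Chars.join ['|']
      (PySem.List.slice splitName none (some (-1)) ++ [fixed])))

-- ===== PRECONDITION & SPEC =====
def Spec_checkDate (seqId : String) (month2021 : List String) (out : Bool × String) : Prop := out = checkDate_alt seqId month2021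
instance (seqId : String) (month2021 : List String) (out : Bool × String) : Decidable (Spec_checkDate seqId month2021 out) := by unfold Spec_checkDate; infer_instance

-- ===== CLAIM (what is proved, stated in full; the proofs are below) =====
def Claim_equal_checkDate : Prop := ∀ (seqId : String) (month2021 : List String), Dom_checkDate seqId month2021 → Spec_checkDate seqId month2021 (checkDate seqId month2021)

-- ===== LEMMAS AND PROOFS =====

-- all digit strings of length 2 (proof-side enumeration universe)
def pvDigits : List Char := ['0', '1', '2', '3', '4', '5', '6', '7', '8', '9']
def pvCanon2 : List (List Char) := [['0', '0'], ['0', '1'], ['0', '2'], ['0', '3'], ['0', '4'], ['0', '5'], ['0', '6'], ['0', '7'], ['0', '8'], ['0', '9'], ['1', '0'], ['1', '1'], ['1', '2'], ['1', '3'], ['1', '4'], ['1', '5'], ['1', '6'], ['1', '7'], ['1', '8'], ['1', '9'], ['2', '0'], ['2', '1'], ['2', '2'], ['2', '3'], ['2', '4'], ['2', '5'], ['2', '6'], ['2', '7'], ['2', '8'], ['2', '9'], ['3', '0'], ['3', '1'], ['3', '2'], ['3', '3'], ['3', '4'], ['3', '5'], ['3', '6'], ['3', '7'], ['3', '8'],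 ['3', '9'], ['4', '0'], ['4', '1'], ['4', '2'], ['4', '3'], ['4', '4'], ['4', '5'], ['4', '6'], ['4', '7'], ['4', '8'], ['4', '9'], ['5', '0'], ['5', '1'], ['5', '2'], ['5', '3'], ['5', '4'], ['5', '5'], ['5', '6'], ['5', '7'], ['5', '8'], ['5', '9'], ['6', '0'], ['6', '1'], ['6', '2'], ['6', '3'], ['6', '4'], ['6', '5'], ['6', '6'], ['6', '7'], ['6', '8'], ['6', '9'], ['7', '0'], ['7', '1'], ['7', '2'], ['7', '3'], ['7', '4'], ['7', '5'], ['7', '6'], ['7', '7'], ['7', '8'], ['7', '9'], ['8', '0'], ['8', '1'], ['8', '2'], ['8', '3'], ['8', '4'], ['8', '5'], ['8', '6'], ['8', '7'], ['8', '8'], ['8', '9'], ['9', '0'], ['9', '1'], ['9', '2'], ['9', '3'], ['9', '4'], ['9', '5'], ['9', '6'], ['9', '7'], ['9', '8'], ['9', '9']]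

-- the common "is a 1- or 2-character digit string" guard, with v its numeric value
abbrev pvGuard (s : List Char) : Prop := PySem.Chars.strIsdigit s = true ∧ s.length ≤ 2
def pvVal (s : List Char) : Int := (PySem.Int.ofChars? s).getD 0
-- the maximal day of a month (proof-side name for A's three day-tables / B's table rows)
def pvMaxday (v : Int) : Int := if v = 2 then 29 else if v ∈ ([4, 6, 9, 11] : List Int) then 30 else 31

lemma pv_digit_enum (c : Char) (h : PySem.Chars.isdigit c = true) : c ∈ pvDigits := by
  simp only [PySem.Chars.isdigit, Bool.and_eq_true, decide_eq_true_eq] at h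
  obtain ⟨h1, h2⟩ := h
  have h1' : 48 ≤ c.toNat := h1
  have h2' : c.toNat ≤ 57 := h2
  have hv : c.toNat = 48 ∨ c.toNat = 49 ∨ c.toNat = 50 ∨ c.toNat = 51 ∨ c.toNat = 52 ∨ c.toNat = 53 ∨
      c.toNat = 54 ∨ c.toNat = 55 ∨ c.toNat = 56 ∨ c.toNat = 57 := by omega
  have hc : ∀ k : Char, c.toNat = k.toNat → c = k := fun k hk => Char.ext (UInt32.toNat_inj.mp hk)
  rcases hv with h|h|h|h|h|h|h|h|h|h
  · simp [pvDigits, hc '0' h]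
  · simp [pvDigits, hc '1' h]
  · simp [pvDigits, hc '2' h]
  · simp [pvDigits, hc '3' h]
  · simp [pvDigits, hc '4' h]
  · simp [pvDigits, hc '5' h]
  · simp [pvDigits, hc '6' h]
  · simp [pvDigits, hc '7' h]
  · simp [pvDigits, hc '8' h]
  · simp [pvDigits, hc '9' h]

lemma pv_canon_enum (s : List Char) (h : pvGuard s) :
    s ∈ pvDigits.map ([·]) ∨ s ∈ pvCanon2 := by
  obtain ⟨hd, hl⟩ := h
  simp only [PySem.Chars.strIsdigit, Bool.and_eq_true, List.all_eq_true] at hd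
  obtain ⟨hne, hall⟩ := hd
  match s, hne with
  | [a], _ =>
    left
    exact List.mem_map.mpr ⟨a, pv_digit_enum a (hall a (by simp)), rfl⟩
  | [a, b], _ =>
    right
    have ha := pv_digit_enum a (hall a (by simp))
    have hb := pv_digit_enum b (hall b (by simp))
    fin_cases ha <;> fin_cases hb <;> decide
  | a :: b :: c :: t, _ => simp at hl

-- membership in A's tables ↔ numeric guards: one proof scheme for the six table lemmas
lemma pv_mem_char (L : List (List Char)) (P : Int → Prop) [DecidablePred P]
    (hf : ∀ s ∈ L, pvGuard s ∧ P (pvVal s))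
    (hb : ∀ s ∈ pvDigits.map ([·]) ++ pvCanon2, P (pvVal s) → s ∈ L)
    (d : List Char) : d ∈ L ↔ pvGuard d ∧ P (pvVal d) := by
  constructor
  · exact hf d
  · rintro ⟨hg, hp⟩
    rcases pv_canon_enum d hg with h | h
    · exact hb d (List.mem_append.mpr (.inl h)) hp
    · exact hb d (List.mem_append.mpr (.inr h)) hp

lemma pv_mem_thirtyMonth (m : List Char) :
    m ∈ pvThirtyMonth ↔ pvGuard m ∧ pvVal m ∈ ([4, 6, 9, 11] : List Int) :=
  pv_mem_char pvThirtyMonth (fun v => v ∈ ([4, 6, 9, 11] : List Int)) (by decide) (by decide) m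

lemma pv_mem_thirtyoneMonth (m : List Char) :
    m ∈ pvThirtyoneMonth ↔ pvGuard m ∧ pvVal m ∈ ([1, 3, 5, 7, 8, 10, 12] : List Int) :=
  pv_mem_char pvThirtyoneMonth (fun v => v ∈ ([1, 3, 5, 7, 8, 10, 12] : List Int)) (by decide) (by decide) m

lemma pv_mem_feb (m : List Char) :
    m ∈ [['2'], ['0', '2']] ↔ pvGuard m ∧ pvVal m = 2 :=
  pv_mem_char [['2'], ['0', '2']] (fun v => v = 2) (by decide) (by decide) m

lemma pv_mem_thirty (d : List Char) :
    d ∈ pvThirty ↔ pvGuard d ∧ 1 ≤ pvVal d ∧ pvVal d ≤ 30 :=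
  pv_mem_char pvThirty (fun v => 1 ≤ v ∧ v ≤ 30) (by decide) (by decide) d

lemma pv_mem_thirtyone (d : List Char) :
    d ∈ pvThirtyone ↔ pvGuard d ∧ 1 ≤ pvVal d ∧ pvVal d ≤ 31 :=
  pv_mem_char pvThirtyone (fun v => 1 ≤ v ∧ v ≤ 31) (by decide) (by decide) d

lemma pv_mem_twenty (d : List Char) :
    d ∈ pvTwenty ↔ pvGuard d ∧ 1 ≤ pvVal d ∧ pvVal d ≤ 29 :=
  pv_mem_char pvTwenty (fun v => 1 ≤ v ∧ v ≤ 29) (by decide) (by decide) d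

-- A's '-0'/'-' zero-padding equals B's f'{:02d}' on every canonical day/month string
lemma pv_fmt (s : List Char) (hs : s ∈ pvThirtyone) :
    (if s ∈ pvSingle then ['-', '0'] ++ s else ['-'] ++ s) = ['-'] ++ pvPad2 (pvVal s) := by
  fin_cases hs <;> decide

lemma pv_interc (ys : List (List Char)) (acc fixed : List Char) :
    (List.foldl (fun a c => a ++ c ++ ['|']) acc ys) ++ fixed
      = acc ++ PySem.Chars.join ['|'] (ys ++ [fixed]) := by
  induction ys generalizing acc with
  | nil => simp [PySem.Chars.join_singleton]
  | cons c ys ih =>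
    have h2 : PySem.Chars.join ['|'] ((c :: ys) ++ [fixed])
        = c ++ ['|'] ++ PySem.Chars.join ['|'] (ys ++ [fixed]) := by
      cases ys <;> simp [PySem.Chars.join_cons_cons]
    rw [List.foldl_cons, ih, h2]
    simp

-- A's rebuild loop followed by the fixed date equals B's '|'.join(splitName[:-1] + [fixed])
lemma pv_tail (xs : List (List Char)) (fixed : List Char) :
    ((PySem.List.pyRange 0 (PySem.List.len xs - 1) 1).foldl
        (fun acc i => acc ++ PySem.List.pyGetD xs i [] ++ ['|']) []) ++ fixed
      = PySem.Chars.join ['|'] (PySem.List.slice xs none (some (-1)) ++ [fixed]) := by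
  rw [PySem.List.slice_to_neg_one]
  rcases List.eq_nil_or_concat' xs with rfl | ⟨ys, z, rfl⟩
  · rw [show PySem.List.len ([] : List (List Char)) - 1 = -1 by decide,
      PySem.List.pyRange_one_eq_nil (by omega)]
    simp [PySem.Chars.join_singleton]
  · have hlen : PySem.List.len (ys ++ [z]) - 1 = PySem.List.len ys := by
      simp [PySem.List.len_eq]
    rw [hlen]
    have hcong : List.foldl (fun acc i => acc ++ PySem.List.pyGetD (ys ++ [z]) i [] ++ ['|']) []
          (PySem.List.pyRange 0 (PySem.List.len ys))
        = List.foldl (fun acc i => acc ++ PySem.List.pyGetD ys i [] ++ ['|']) []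
          (PySem.List.pyRange 0 (PySem.List.len ys)) := by
      apply PySem.List.foldl_congr_mem
      intro acc i hi
      rw [PySem.List.mem_pyRange_one] at hi
      have hi' : i < (ys.length : Int) := by simpa [PySem.List.len_eq] using hi.2
      rw [PySem.List.pyGetD_eq_getElem _ _ hi.1 (by simp; omega),
        PySem.List.pyGetD_eq_getElem _ _ hi.1 hi',
        List.getElem_append_left]
    rw [hcong,
      PySem.List.foldl_pyRange_pyGetD ys [] (fun acc c => acc ++ c ++ ['|']) [] le_rfl,
      show Int.toNat 0 = 0 from rfl, List.drop_zero, pv_interc]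
    simp

lemma pv_rest_eq (seqId : String) (month2021 : List String)
    (splitName : List (List Char)) (year month date : List Char)
    (hm : month ∈ pvThirtyone) (hd : date ∈ pvThirtyone) :
    checkDateRest seqId month2021 splitName year month date
      = (if year = ['2', '0', '2', '1'] ∧ month ∉ month2021.map String.toList then ((false : Bool), seqId)
        else (true, String.ofList (PySem.Chars.join ['|']
          (PySem.List.slice splitName none (some (-1)) ++
            [year ++ ['-'] ++ pvPad2 (pvVal month) ++ ['-'] ++ pvPad2 (pvVal date)])))) := by
  unfold checkDateRest
  by_cases h21 : year = ['2', '0', '2', '1'] ∧ month ∉ month2021.map String.toList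
  · rw [if_pos h21, if_pos h21]
  · rw [if_neg h21, if_neg h21]
    show (true, String.ofList (((PySem.List.pyRange 0 (PySem.List.len splitName - 1) 1).foldl
            (fun acc i => acc ++ PySem.List.pyGetD splitName i [] ++ ['|']) []) ++
          ((year ++ (if month ∈ pvSingle then ['-', '0'] ++ month else ['-'] ++ month)) ++
            (if date ∈ pvSingle then ['-', '0'] ++ date else ['-'] ++ date)))) = _
    rw [pv_fmt month hm, pv_fmt date hd, ← pv_tail]
    simp [List.append_assoc]

lemma pv_body_eq (seqId : String) (month2021 : List String)
    (splitName : List (List Char)) (year month date : List Char) :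
    checkDateBody seqId month2021 splitName year month date
      = (if year ∉ pvValidYear then ((false : Bool), seqId)
        else if ¬ (PySem.Chars.strIsdigit month = true ∧ month.length ≤ 2 ∧
                   1 ≤ pvVal month ∧ pvVal month ≤ 12) then (false, seqId)
        else if ¬ (PySem.Chars.strIsdigit date = true ∧ date.length ≤ 2 ∧
              1 ≤ pvVal date ∧ pvVal date ≤
                (if pvVal month = 2 then 29
                 else if pvVal month ∈ ([4, 6, 9, 11] : List Int) then 30 else 31)) then
          (false, seqId)
        else if year = ['2', '0', '2', '1'] ∧ month ∉ month2021.map String.toList then (false, seqId)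
        else (true, String.ofList (PySem.Chars.join ['|']
          (PySem.List.slice splitName none (some (-1)) ++
            [year ++ ['-'] ++ pvPad2 (pvVal month) ++ ['-'] ++ pvPad2 (pvVal date)])))) := by
  unfold checkDateBody
  by_cases hy : year ∉ pvValidYear
  · rw [if_pos hy, if_pos hy]
  · rw [if_neg hy, if_neg hy]
    by_cases h30 : month ∈ pvThirtyMonth
    · obtain ⟨hg, hmv⟩ := (pv_mem_thirtyMonth month).mp h30
      have hm1 : 1 ≤ pvVal month ∧ pvVal month ≤ 12 := by
        simp only [List.mem_cons, List.not_mem_nil, or_false] at hmv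
        rcases hmv with h|h|h|h <;> rw [h] <;> norm_num
      have hne2 : ¬ pvVal month = 2 := by
        simp only [List.mem_cons, List.not_mem_nil, or_false] at hmv
        rcases hmv with h|h|h|h <;> rw [h] <;> norm_num
      have hBm : ¬¬(PySem.Chars.strIsdigit month = true ∧ month.length ≤ 2 ∧
          1 ≤ pvVal month ∧ pvVal month ≤ 12) := not_not_intro ⟨hg.1, hg.2, hm1.1, hm1.2⟩
      rw [if_pos h30, if_neg hBm, if_neg hne2, if_pos hmv]
      by_cases hD : date ∈ pvThirty
      · obtain ⟨hgd, hd1, hd2⟩ := (pv_mem_thirty date).mp hD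
        have hAd : ¬(date ∉ pvThirty) := not_not_intro hD
        have hBd : ¬¬(PySem.Chars.strIsdigit date = true ∧ date.length ≤ 2 ∧
            1 ≤ pvVal date ∧ pvVal date ≤ 30) := not_not_intro ⟨hgd.1, hgd.2, hd1, hd2⟩
        rw [if_neg hAd, if_neg hBd]
        exact pv_rest_eq seqId month2021 splitName year month date
          ((pv_mem_thirtyone month).mpr ⟨hg, hm1.1, by omega⟩)
          ((pv_mem_thirtyone date).mpr ⟨hgd, hd1, by omega⟩)
      · have hBd : ¬(PySem.Chars.strIsdigit date = true ∧ date.length ≤ 2 ∧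
            1 ≤ pvVal date ∧ pvVal date ≤ 30) :=
          fun hc => hD ((pv_mem_thirty date).mpr ⟨⟨hc.1, hc.2.1⟩, hc.2.2⟩)
        rw [if_pos hD, if_pos hBd]
    · rw [if_neg h30]
      by_cases h31 : month ∈ pvThirtyoneMonth
      · obtain ⟨hg, hmv⟩ := (pv_mem_thirtyoneMonth month).mp h31
        have hm1 : 1 ≤ pvVal month ∧ pvVal month ≤ 12 := by
          simp only [List.mem_cons, List.not_mem_nil, or_false] at hmv
          rcases hmv with h|h|h|h|h|h|h <;> rw [h] <;> norm_num
        have hne2 : ¬ pvVal month = 2 := by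
          simp only [List.mem_cons, List.not_mem_nil, or_false] at hmv
          rcases hmv with h|h|h|h|h|h|h <;> rw [h] <;> norm_num
        have hn30 : ¬ pvVal month ∈ ([4, 6, 9, 11] : List Int) := by
          simp only [List.mem_cons, List.not_mem_nil, or_false] at hmv ⊢
          rcases hmv with h|h|h|h|h|h|h <;> rw [h] <;> norm_num
        have hBm : ¬¬(PySem.Chars.strIsdigit month = true ∧ month.length ≤ 2 ∧
            1 ≤ pvVal month ∧ pvVal month ≤ 12) := not_not_intro ⟨hg.1, hg.2, hm1.1, hm1.2⟩
        rw [if_pos h31, if_neg hBm, if_neg hne2, if_neg hn30]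
        by_cases hD : date ∈ pvThirtyone
        · obtain ⟨hgd, hd1, hd2⟩ := (pv_mem_thirtyone date).mp hD
          have hAd : ¬(date ∉ pvThirtyone) := not_not_intro hD
          have hBd : ¬¬(PySem.Chars.strIsdigit date = true ∧ date.length ≤ 2 ∧
              1 ≤ pvVal date ∧ pvVal date ≤ 31) := not_not_intro ⟨hgd.1, hgd.2, hd1, hd2⟩
          rw [if_neg hAd, if_neg hBd]
          exact pv_rest_eq seqId month2021 splitName year month date
            ((pv_mem_thirtyone month).mpr ⟨hg, hm1.1, by omega⟩) hD
        · have hBd : ¬(PySem.Chars.strIsdigit date = true ∧ date.length ≤ 2 ∧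
              1 ≤ pvVal date ∧ pvVal date ≤ 31) :=
            fun hc => hD ((pv_mem_thirtyone date).mpr ⟨⟨hc.1, hc.2.1⟩, hc.2.2⟩)
          rw [if_pos hD, if_pos hBd]
      · rw [if_neg h31]
        by_cases hf : month ∈ [['2'], ['0', '2']]
        · obtain ⟨hg, hmv⟩ := (pv_mem_feb month).mp hf
          have hBm : ¬¬(PySem.Chars.strIsdigit month = true ∧ month.length ≤ 2 ∧
              1 ≤ pvVal month ∧ pvVal month ≤ 12) :=
            not_not_intro ⟨hg.1, hg.2, by rw [hmv]; norm_num, by rw [hmv]; norm_num⟩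
          rw [if_pos hf, if_neg hBm, if_pos hmv]
          by_cases hD : date ∈ pvTwenty
          · obtain ⟨hgd, hd1, hd2⟩ := (pv_mem_twenty date).mp hD
            have hAd : ¬(date ∉ pvTwenty) := not_not_intro hD
            have hBd : ¬¬(PySem.Chars.strIsdigit date = true ∧ date.length ≤ 2 ∧
                1 ≤ pvVal date ∧ pvVal date ≤ 29) := not_not_intro ⟨hgd.1, hgd.2, hd1, hd2⟩
            rw [if_neg hAd, if_neg hBd]
            exact pv_rest_eq seqId month2021 splitName year month date
              ((pv_mem_thirtyone month).mpr ⟨hg, by rw [hmv]; norm_num⟩)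
              ((pv_mem_thirtyone date).mpr ⟨hgd, hd1, by omega⟩)
          · have hBd : ¬(PySem.Chars.strIsdigit date = true ∧ date.length ≤ 2 ∧
                1 ≤ pvVal date ∧ pvVal date ≤ 29) :=
              fun hc => hD ((pv_mem_twenty date).mpr ⟨⟨hc.1, hc.2.1⟩, hc.2.2⟩)
            rw [if_pos hD, if_pos hBd]
        · have hBm : ¬(PySem.Chars.strIsdigit month = true ∧ month.length ≤ 2 ∧
              1 ≤ pvVal month ∧ pvVal month ≤ 12) := by
            rintro ⟨h1, h2, h3, h4⟩
            have hg : pvGuard month := ⟨h1, h2⟩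
            have hv : pvVal month = 1 ∨ pvVal month = 2 ∨ pvVal month = 3 ∨ pvVal month = 4 ∨
                pvVal month = 5 ∨ pvVal month = 6 ∨ pvVal month = 7 ∨ pvVal month = 8 ∨
                pvVal month = 9 ∨ pvVal month = 10 ∨ pvVal month = 11 ∨ pvVal month = 12 := by omega
            rcases hv with h|h|h|h|h|h|h|h|h|h|h|h
            · exact h31 ((pv_mem_thirtyoneMonth month).mpr ⟨hg, by rw [h]; norm_num⟩)
            · exact hf ((pv_mem_feb month).mpr ⟨hg, h⟩)
            · exact h31 ((pv_mem_thirtyoneMonth month).mpr ⟨hg, by rw [h]; norm_num⟩)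
            · exact h30 ((pv_mem_thirtyMonth month).mpr ⟨hg, by rw [h]; norm_num⟩)
            · exact h31 ((pv_mem_thirtyoneMonth month).mpr ⟨hg, by rw [h]; norm_num⟩)
            · exact h30 ((pv_mem_thirtyMonth month).mpr ⟨hg, by rw [h]; norm_num⟩)
            · exact h31 ((pv_mem_thirtyoneMonth month).mpr ⟨hg, by rw [h]; norm_num⟩)
            · exact h31 ((pv_mem_thirtyoneMonth month).mpr ⟨hg, by rw [h]; norm_num⟩)
            · exact h30 ((pv_mem_thirtyMonth month).mpr ⟨hg, by rw [h]; norm_num⟩)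
            · exact h31 ((pv_mem_thirtyoneMonth month).mpr ⟨hg, by rw [h]; norm_num⟩)
            · exact h30 ((pv_mem_thirtyMonth month).mpr ⟨hg, by rw [h]; norm_num⟩)
            · exact h31 ((pv_mem_thirtyoneMonth month).mpr ⟨hg, by rw [h]; norm_num⟩)
          rw [if_neg hf, if_pos hBm]

-- ===== B-side lemmas: the padded date is in the table iff the numeric guards hold =====

-- pvPad s hits a 2-character target t iff s is t itself or t without a leading '0'
lemma pv_pad_eq (s t : List Char) (ht : t.length = 2) :
    pvPad s = t ↔ (s = t ∨ '0' :: s = t) := by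
  unfold pvPad
  by_cases h : s.length = 1
  · rw [if_pos h]
    constructor
    · intro he; right; exact he
    · rintro (rfl | he)
      · omega
      · exact he
  · rw [if_neg h]
    constructor
    · intro he; left; exact he
    · rintro (rfl | he)
      · rfl
      · exfalso; apply h
        have := congrArg List.length he
        simp at this; omega

lemma pv_pad2_guard (v : Int) (h1 : 1 ≤ v) (h2 : v ≤ 31) :
    pvGuard (pvPad2 v) ∧ pvVal (pvPad2 v) = v ∧ (pvPad2 v).length = 2 ∧ '-' ∉ pvPad2 v := by
  interval_cases v <;> decide

lemma pv_pad2_cons (v : Int) (h1 : 1 ≤ v) (h2 : v ≤ 31) (s : List Char)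
    (hs : '0' :: s = pvPad2 v) : pvGuard s ∧ pvVal s = v := by
  have hts : s = (pvPad2 v).drop 1 := by rw [← hs]; simp
  subst hts
  have hh : ('0' :: (pvPad2 v).drop 1).take 1 = (pvPad2 v).take 1 := by rw [hs]
  revert hh
  interval_cases v <;> decide

-- pad s = '%02d' % v exactly when s is a 1- or 2-digit string of value v
lemma pv_pad_iff (s : List Char) (v : Int) (h1 : 1 ≤ v) (h2 : v ≤ 31) :
    pvPad s = pvPad2 v ↔ (pvGuard s ∧ pvVal s = v) := by
  obtain ⟨hg2, hv2, hl2, _⟩ := pv_pad2_guard v h1 h2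
  constructor
  · intro h
    rcases (pv_pad_eq s (pvPad2 v) hl2).mp h with rfl | hc
    · exact ⟨hg2, hv2⟩
    · exact pv_pad2_cons v h1 h2 s hc
  · rintro ⟨hg, hv⟩
    rcases pv_canon_enum s hg with h | h <;> [skip; skip] <;>
      fin_cases h <;> rw [← hv] at h1 h2 ⊢ <;> revert h1 h2 <;> decide

lemma pv_pad_minus (s : List Char) (h : '-' ∉ s) : '-' ∉ pvPad s := by
  unfold pvPad; split
  · simp [h]
  · exact h

lemma pv_maxday_facts (v : Int) : 28 ≤ pvMaxday v ∧ pvMaxday v ≤ 31 := by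
  unfold pvMaxday; split_ifs <;> norm_num

lemma pv_md_facts : ∀ md ∈ pvMonthDays, 1 ≤ md.1 ∧ md.1 ≤ 12 ∧ md.2 = pvMaxday md.1 := by decide

lemma pv_md_mem (v : Int) (h1 : 1 ≤ v) (h2 : v ≤ 12) : (v, pvMaxday v) ∈ pvMonthDays := by
  interval_cases v <;> decide

-- splitting a twice-'-'-separated concatenation is unique when the components are '-'-free
lemma pv_decomp (a : List Char) : ∀ (a' b b' : List Char), '-' ∉ a → '-' ∉ a' →
    a ++ '-' :: b = a' ++ '-' :: b' → a = a' ∧ b = b' := by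
  induction a with
  | nil =>
    intro a' b b' _ ha' h
    cases a' with
    | nil => simp_all
    | cons y u =>
      exfalso
      simp only [List.nil_append, List.cons_append, List.cons.injEq] at h
      exact ha' (by simp [← h.1])
  | cons x t ih =>
    intro a' b b' ha ha' h
    cases a' with
    | nil =>
      exfalso
      simp only [List.cons_append, List.nil_append, List.cons.injEq] at h
      exact ha (by simp [h.1])
    | cons y u =>
      simp only [List.cons_append, List.cons.injEq] at h
      obtain ⟨rfl, h2⟩ := h
      obtain ⟨rfl, rfl⟩ := ih u b b' (fun hm => ha (by simp [hm])) (fun hm => ha' (by simp [hm])) h2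
      exact ⟨rfl, rfl⟩

-- the main characterisation: the normalized date string is in B's table iff
-- the year is valid and month/day are digit strings within the numeric bounds
lemma pv_mem_validDates (year month date : List Char)
    (hy : '-' ∉ year) (hm : '-' ∉ month) (_hd : '-' ∉ date) :
    (year ++ ['-'] ++ pvPad month ++ ['-'] ++ pvPad date) ∈ pvValidDates ↔
      (year ∈ pvValidYear ∧ pvGuard month ∧ 1 ≤ pvVal month ∧ pvVal month ≤ 12 ∧
       pvGuard date ∧ 1 ≤ pvVal date ∧ pvVal date ≤ pvMaxday (pvVal month)) := by
  unfold pvValidDates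
  simp only [List.mem_flatMap, List.mem_map]
  constructor
  · rintro ⟨y, hy', md, hmd, d, hdr, heq⟩
    rw [PySem.List.mem_pyRange_one] at hdr
    obtain ⟨hmd1, hmd2, hmd3⟩ := pv_md_facts md hmd
    have hd1 : 1 ≤ d := hdr.1
    have hd2 : d ≤ md.2 := by omega
    have hd31 : d ≤ 31 := by
      have := (pv_maxday_facts md.1).2; omega
    have hym : '-' ∉ y := by
      have hy'' := hy'
      simp only [List.mem_cons, List.not_mem_nil, or_false] at hy''
      rcases hy'' with rfl | rfl <;> decide
    obtain ⟨_, _, _, hpm⟩ := pv_pad2_guard md.1 hmd1 (by omega)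
    obtain ⟨_, _, _, hpd⟩ := pv_pad2_guard d hd1 hd31
    have heq' : year ++ '-' :: (pvPad month ++ '-' :: pvPad date)
        = y ++ '-' :: (pvPad2 md.1 ++ '-' :: pvPad2 d) := by
      simpa [List.append_assoc] using heq.symm
    obtain ⟨rfl, heq2⟩ := pv_decomp year y _ _ hy hym heq'
    obtain ⟨hpmeq, hpdeq⟩ := pv_decomp (pvPad month) (pvPad2 md.1) _ _
      (pv_pad_minus month hm) hpm heq2
    obtain ⟨hgm, hvm⟩ := (pv_pad_iff month md.1 hmd1 (by omega)).mp hpmeq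
    obtain ⟨hgd, hvd⟩ := (pv_pad_iff date d hd1 hd31).mp hpdeq
    refine ⟨hy', hgm, by omega, by omega, hgd, by omega, ?_⟩
    rw [hvm, hvd] at *
    omega
  · rintro ⟨h1, hgm, h2, h3, hgd, h4, h5⟩
    refine ⟨year, h1, (pvVal month, pvMaxday (pvVal month)), pv_md_mem _ h2 h3,
      pvVal date, ?_, ?_⟩
    · rw [PySem.List.mem_pyRange_one]
      exact ⟨h4, by omega⟩
    · rw [(pv_pad_iff month (pvVal month) h2 (by omega)).mpr ⟨hgm, rfl⟩,
        (pv_pad_iff date (pvVal date) h4 (by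
          have := (pv_maxday_facts (pvVal month)).2; omega)).mpr ⟨hgd, rfl⟩]

-- B's body (after the 3-way unpack) equals A's canonical intermediate form
lemma pv_alt_eq (seqId : String) (month2021 : List String)
    (splitName : List (List Char)) (year month date : List Char)
    (hy : '-' ∉ year) (hm : '-' ∉ month) (hd : '-' ∉ date) :
    (if (year ++ ['-'] ++ pvPad month ++ ['-'] ++ pvPad date) ∉ pvValidDates then ((false : Bool), seqId)
     else if year = ['2', '0', '2', '1'] ∧ month ∉ month2021.map String.toList then (false, seqId)
     else (true, String.ofList (PySem.Chars.join ['|']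
       (PySem.List.slice splitName none (some (-1)) ++
         [year ++ ['-'] ++ pvPad month ++ ['-'] ++ pvPad date]))))
    = (if year ∉ pvValidYear then ((false : Bool), seqId)
        else if ¬ (PySem.Chars.strIsdigit month = true ∧ month.length ≤ 2 ∧
                   1 ≤ pvVal month ∧ pvVal month ≤ 12) then (false, seqId)
        else if ¬ (PySem.Chars.strIsdigit date = true ∧ date.length ≤ 2 ∧
              1 ≤ pvVal date ∧ pvVal date ≤
                (if pvVal month = 2 then 29
                 else if pvVal month ∈ ([4, 6, 9, 11] : List Int) then 30 else 31)) then
          (false, seqId)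
        else if year = ['2', '0', '2', '1'] ∧ month ∉ month2021.map String.toList then (false, seqId)
        else (true, String.ofList (PySem.Chars.join ['|']
          (PySem.List.slice splitName none (some (-1)) ++
            [year ++ ['-'] ++ pvPad2 (pvVal month) ++ ['-'] ++ pvPad2 (pvVal date)])))) := by
  have hmax : (if pvVal month = 2 then (29 : Int)
      else if pvVal month ∈ ([4, 6, 9, 11] : List Int) then 30 else 31) = pvMaxday (pvVal month) := rfl
  rw [hmax]
  by_cases hc : year ∈ pvValidYear ∧ pvGuard month ∧ 1 ≤ pvVal month ∧ pvVal month ≤ 12 ∧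
      pvGuard date ∧ 1 ≤ pvVal date ∧ pvVal date ≤ pvMaxday (pvVal month)
  · obtain ⟨h1, hgm, h2, h3, hgd, h4, h5⟩ := hc
    rw [if_neg (not_not_intro ((pv_mem_validDates year month date hy hm hd).mpr
        ⟨h1, hgm, h2, h3, hgd, h4, h5⟩)),
      if_neg (not_not_intro h1),
      if_neg (not_not_intro ⟨hgm.1, hgm.2, h2, h3⟩),
      if_neg (not_not_intro ⟨hgd.1, hgd.2, h4, h5⟩),
      (pv_pad_iff month (pvVal month) h2 (by omega)).mpr ⟨hgm, rfl⟩,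
      (pv_pad_iff date (pvVal date) h4 (by
        have := (pv_maxday_facts (pvVal month)).2; omega)).mpr ⟨hgd, rfl⟩]
  · rw [if_pos (fun hmem => hc ((pv_mem_validDates year month date hy hm hd).mp hmem))]
    split_ifs with g1 g2 g3 g4 <;>
      first
      | rfl
      | exact absurd ⟨g1, ⟨g2.1, g2.2.1⟩, g2.2.2.1, g2.2.2.2,
          ⟨g3.1, g3.2.1⟩, g3.2.2.1, g3.2.2.2⟩ hc

-- pieces produced by splitOn (sep = "-") never contain the separator
lemma pv_go_pieces : ∀ (fuel : Nat) (l cur : List Char) (acc : List (List Char)),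
    l.length < fuel → '-' ∉ cur →
    ∀ p ∈ PySem.Chars.splitOn.go ['-'] fuel l cur acc, p ∈ acc ∨ '-' ∉ p := by
  intro fuel
  induction fuel with
  | zero => intro l cur acc hlt; omega
  | succ f ih =>
    intro l cur acc hlt hcur p hp
    cases l with
    | nil =>
      rw [show PySem.Chars.splitOn.go ['-'] (f + 1) [] cur acc
          = (cur.reverse :: acc).reverse from rfl] at hp
      rw [List.mem_reverse, List.mem_cons] at hp
      rcases hp with rfl | hp
      · right; simp [hcur]
      · left; exact hp
    | cons c rest =>
      rw [show PySem.Chars.splitOn.go ['-'] (f + 1) (c :: rest) cur acc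
          = if List.isPrefixOf ['-'] (c :: rest)
            then PySem.Chars.splitOn.go ['-'] f (List.drop 1 (c :: rest)) [] (cur.reverse :: acc)
            else PySem.Chars.splitOn.go ['-'] f rest (c :: cur) acc from rfl] at hp
      by_cases hpre : List.isPrefixOf ['-'] (c :: rest)
      · rw [if_pos hpre] at hp
        rcases ih (List.drop 1 (c :: rest)) [] (cur.reverse :: acc)
            (by simp at hlt ⊢; omega) (by simp) p hp with hmem | hnp
        · rcases List.mem_cons.mp hmem with rfl | hmem'
          · right; simp [hcur]
          · left; exact hmem'
        · right; exact hnp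
      · rw [if_neg hpre] at hp
        have hc : c ≠ '-' := by
          intro rfl'
          exact hpre (by simp [List.isPrefixOf, rfl'])
        rcases ih rest (c :: cur) acc (by simp at hlt ⊢; omega)
            (by simp [hcur]; exact fun h => hc h.symm) p hp with hmem | hnp
        · left; exact hmem
        · right; exact hnp

lemma pv_split_pieces (s : List Char) : ∀ p ∈ PySem.Chars.splitOn s ['-'], '-' ∉ p := by
  intro p hp
  rcases pv_go_pieces (s.length + 1) s [] [] (by omega) (by simp) p
      (by simpa [PySem.Chars.splitOn] using hp) with hmem | hnp
  · simp at hmem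
  · exact hnp

-- ===== VERDICT (by name: the statement is the Claim_ definition above) =====
theorem checkDate_spec : Claim_equal_checkDate := by
  intro seqId month2021 _
  simp only [Spec_checkDate, checkDate, checkDate_alt]
  have hps := pv_split_pieces ((PySem.List.pyGet? (PySem.Chars.splitOn seqId.toList ['|']) (-1)).getD [])
  generalize PySem.Chars.splitOn ((PySem.List.pyGet? (PySem.Chars.splitOn seqId.toList ['|']) (-1)).getD []) ['-'] = ps at hps ⊢
  match ps with
  | [] => rfl
  | [_] => rfl
  | [_, _] => rfl
  | [a, b, c] =>
    have ha : '-' ∉ a := hps a (by simp)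
    have hb : '-' ∉ b := hps b (by simp)
    have hc : '-' ∉ c := hps c (by simp)
    rw [if_neg (by simp)]
    simp only [List.getD_cons_zero, List.getD_cons_succ]
    show checkDateBody seqId month2021 (PySem.Chars.splitOn seqId.toList ['|']) a b c = _
    rw [pv_body_eq]
    exact (pv_alt_eq seqId month2021 (PySem.Chars.splitOn seqId.toList ['|']) a b c ha hb hc).symm
  | _ :: _ :: _ :: _ :: t =>
    rw [if_pos (by simp [List.length_cons])]
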